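-- pv_equiv track=rewrite | github.com/orihuela97/Heuristica-p2 | a_starAntiguo.py | getCosteMinimoMovimiento
-- ===== SOURCE A (Python) =====
-- def getCosteMinimoMovimiento(matrizCostes):
--     if(len(matrizCostes)>0):
--         if(len(matrizCostes[0])>0):
--             costeMinimo=matrizCostes[0][0]
--             for i in matrizCostes:
--                 for j in i:
--                     if (j<costeMinimo and j!=-1) or (costeMinimo==-1):
--                         costeMinimo=j
--             return costeMinimo
--     return 0
-- ===== SOURCE B (Python) =====
-- def getCosteMinimoMovimiento(matrizCostes):
--     if len(matrizCostes) == 0: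
--         return 0
--     if len(matrizCostes[0]) == 0:
--         return 0
--     plano = sorted(v for fila in matrizCostes for v in fila)
--     for v in plano:
--         if v != -1:
--             return v
--     return -1
-- ===== Notes on version B (the rewrite author's own statement) =====
-- stated objective: alternative
-- what changed: Replaces A's sentinel-fused single nested pass tracking a running minimum by sort-then-scan: flatten all entries, sort ascending, and return the first element different from -1 (or -1 if none), relying on the order rather than an accumulator.
import Mathlib
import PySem

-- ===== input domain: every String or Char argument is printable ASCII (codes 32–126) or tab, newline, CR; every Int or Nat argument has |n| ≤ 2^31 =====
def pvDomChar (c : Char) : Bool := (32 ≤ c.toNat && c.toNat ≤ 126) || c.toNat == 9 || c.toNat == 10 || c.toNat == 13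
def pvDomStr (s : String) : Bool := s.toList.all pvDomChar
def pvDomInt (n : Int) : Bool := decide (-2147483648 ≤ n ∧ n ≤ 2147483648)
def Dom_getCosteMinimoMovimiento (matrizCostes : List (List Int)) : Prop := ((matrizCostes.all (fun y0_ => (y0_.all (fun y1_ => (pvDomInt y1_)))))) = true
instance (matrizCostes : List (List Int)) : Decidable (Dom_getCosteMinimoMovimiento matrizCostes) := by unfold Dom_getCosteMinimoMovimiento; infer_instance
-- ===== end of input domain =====

-- B replaces A's sentinel-fused running-minimum pass by sort-then-scan (flatten, sort ascending, first element ≠ -1, default -1); same result, objective: alternative.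

-- ===== PORT A =====
-- the body of A's inner-loop if: update costeMinimo to j when (j<c and j!=-1) or c==-1
def pvStepA (c j : Int) : Int := if (j < c ∧ j ≠ -1) ∨ c = -1 then j else c

def getCosteMinimoMovimiento (matrizCostes : List (List Int)) : Int :=
  match matrizCostes with
  | [] => 0                       -- len(matrizCostes)>0 fails
  | r0 :: _ =>
    match r0 with
    | [] => 0                     -- len(matrizCostes[0])>0 fails
    | x :: _ =>
      -- costeMinimo = matrizCostes[0][0]; nested for-loops over rows and entries
      matrizCostes.foldl (fun c i => i.foldl pvStepA c) x

-- ===== PORT B =====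
-- the 'for v in plano: if v != -1: return v' scan with final 'return -1'
def pvFirstNe (l : List Int) : Int :=
  match l with
  | [] => -1
  | v :: t => if v ≠ -1 then v else pvFirstNe t

def getCosteMinimoMovimiento_alt (matrizCostes : List (List Int)) : Int :=
  match matrizCostes with
  | [] => 0
  | r0 :: _ =>
    match r0 with
    | [] => 0
    | _ :: _ =>
      -- plano = sorted(flattened entries); scan for the first value ≠ -1
      pvFirstNe (PySem.List.sorted (matrizCostes.flatMap id) (fun y => y))

-- ===== PRECONDITION & SPEC =====
def Spec_getCosteMinimoMovimiento (matrizCostes : List (List Int)) (out : Int) : Prop := out = getCosteMinimoMovimiento_alt matrizCostes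
instance (matrizCostes : List (List Int)) (out : Int) : Decidable (Spec_getCosteMinimoMovimiento matrizCostes out) := by unfold Spec_getCosteMinimoMovimiento; infer_instance

-- ===== CLAIM =====
def Claim_equal_getCosteMinimoMovimiento : Prop := ∀ (matrizCostes : List (List Int)), Dom_getCosteMinimoMovimiento matrizCostes → Spec_getCosteMinimoMovimiento matrizCostes (getCosteMinimoMovimiento matrizCostes)

-- ===== LEMMAS AND PROOFS =====

-- both sides characterised through the same quantity: min of the non-(-1) entries, -1 if none
def pvMinNe (l : List Int) : Int :=
  (PySem.List.min? (l.filter (fun j => decide (j ≠ -1))) (fun y => y)).getD (-1)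

-- once the accumulator is a non-(-1) value, A's loop is a running min over the non-(-1) entries
theorem pvFoldA_ne (l : List Int) : ∀ c : Int, c ≠ -1 →
    l.foldl pvStepA c = (l.filter (fun j => decide (j ≠ -1))).foldl min c := by
  induction l with
  | nil => intro c _; rfl
  | cons j t ih =>
    intro c hc
    by_cases hj : j = -1
    · subst hj
      have hstep : pvStepA c (-1) = c := by simp [pvStepA, hc]
      simp [hstep, ih c hc]
    · have hstep : pvStepA c j = min c j := by
        simp only [pvStepA, min_def]
        split_ifs <;> omega
      have hmin : min c j ≠ -1 := by
        rcases min_choice c j with h | h <;> omega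
      simp [hj, hstep, List.foldl_cons, ih (min c j) hmin]

-- starting from the -1 seed, A's loop computes pvMinNe
theorem pvFoldA_neg1 (l : List Int) : l.foldl pvStepA (-1) = pvMinNe l := by
  induction l with
  | nil => rfl
  | cons j t ih =>
    have hstep : pvStepA (-1) j = j := by simp [pvStepA]
    by_cases hj : j = -1
    · subst hj
      simpa [pvMinNe, hstep] using ih
    · have := pvFoldA_ne t j hj
      simp [pvMinNe, hj, hstep, this, PySem.List.min?_id_cons]

-- folding min over elements that are all ≥ c leaves c
theorem pvFoldMin_const (l : List Int) (c : Int) (h : ∀ y ∈ l, c ≤ y) :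
    l.foldl min c = c := by
  induction l with
  | nil => rfl
  | cons a t ih =>
    have hc : min c a = c := min_eq_left (h a (by simp))
    simp only [List.foldl_cons, hc]
    exact ih (fun y hy => h y (by simp [hy]))

-- min? with identity key is invariant under permutation
theorem pvMin?_perm (l l' : List Int) (h : l.Perm l') :
    PySem.List.min? l (fun y => y) = PySem.List.min? l' (fun y => y) := by
  match hl : PySem.List.min? l (fun y => y), hl' : PySem.List.min? l' (fun y => y) with
  | none, none => rfl
  | none, some m' =>
    rw [PySem.List.min?_eq_none_iff] at hl
    subst hl
    have := PySem.List.min?_mem hl'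
    exact absurd (h.symm.mem_iff.mp this) (by simp)
  | some m, none =>
    rw [PySem.List.min?_eq_none_iff] at hl'
    subst hl'
    have := PySem.List.min?_mem hl
    exact absurd (h.mem_iff.mp this) (by simp)
  | some m, some m' =>
    have hm : m ∈ l := PySem.List.min?_mem hl
    have hm' : m' ∈ l' := PySem.List.min?_mem hl'
    have h1 : m ≤ m' := PySem.List.min?_isMin hl m' (h.symm.mem_iff.mp hm')
    have h2 : m' ≤ m := PySem.List.min?_isMin hl' m (h.mem_iff.mp hm)
    simp [le_antisymm h1 h2]

-- on an ascending list, the first element ≠ -1 is pvMinNe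
theorem pvFirstNe_sorted (s : List Int) (hs : s.Pairwise (· ≤ ·)) :
    pvFirstNe s = pvMinNe s := by
  induction s with
  | nil => rfl
  | cons a t ih =>
    have hle : ∀ y ∈ t, a ≤ y := fun y hy => (List.pairwise_cons.mp hs).1 y hy
    have ht : t.Pairwise (· ≤ ·) := (List.pairwise_cons.mp hs).2
    by_cases ha : a = -1
    · subst ha
      simpa [pvFirstNe, pvMinNe] using ih ht
    · have hfil : ∀ y ∈ t.filter (fun j => decide (j ≠ -1)), a ≤ y := by
        intro y hy; exact hle y (List.mem_of_mem_filter hy)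
      simp [pvFirstNe, pvMinNe, ha, PySem.List.min?_id_cons]
      exact (pvFoldMin_const _ _ (by simpa using hfil)).symm

-- scanning the sorted flattening computes pvMinNe of the flattening
theorem pvB_char (l : List Int) :
    pvFirstNe (PySem.List.sorted l (fun y => y)) = pvMinNe l := by
  have hperm : (PySem.List.sorted l (fun y => y)).Perm l := PySem.List.sorted_perm l _ _
  rw [pvFirstNe_sorted _ (PySem.List.sorted_pairwise l _)]
  unfold pvMinNe
  rw [pvMin?_perm _ _ (hperm.filter _)]

-- ===== VERDICT =====
theorem getCosteMinimoMovimiento_spec : Claim_equal_getCosteMinimoMovimiento := by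
  unfold Claim_equal_getCosteMinimoMovimiento
  intro m _
  unfold Spec_getCosteMinimoMovimiento
  match m with
  | [] => rfl
  | [] :: rows => rfl
  | (x :: r0t) :: rows =>
    show ((x :: r0t) :: rows).foldl (fun c i => i.foldl pvStepA c) x = _
    rw [← List.foldl_flatten]
    simp only [getCosteMinimoMovimiento_alt, List.flatMap_id]
    rw [pvB_char]
    have hflat : ((x :: r0t) :: rows).flatten = x :: (r0t ++ rows.flatten) := by simp
    rw [hflat]
    by_cases hx : x = -1
    · subst hx
      simpa using pvFoldA_neg1 ((-1 : Int) :: (r0t ++ rows.flatten))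
    · have hstep : pvStepA x x = x := by simp [pvStepA]
      have h1 := pvFoldA_ne (r0t ++ rows.flatten) x hx
      simp [pvMinNe, List.foldl_cons, hstep, h1, hx, PySem.List.min?_id_cons]
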